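-- pv_equiv track=rewrite | github.com/kanishkcs/CodeChef | Longest-Subarray.py | longests
-- ===== SOURCE A (Python) =====
-- def longests(arr):
--
--     result = []
--     conitnue = []
--     length_of_result = []
--
--     for arry_items in arr:
--         if arry_items % 2 == 0:
--             conitnue.append(arry_items)
--             if arry_items == arr[-1]:
--                 result.append(conitnue)
--         else:
--             result.append(conitnue)
--             conitnue = []
--
--
--     for a in range(0, len(result)):
--         length_of_result.append(len(result[a]))
--         pass
--
--     return max(length_of_result)
-- ===== SOURCE B (Python) =====
-- from itertools import groupby
--
--
-- def longests(arr):
--     # idiomatic: group by parity, take the max run length of evens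
--     # (ValueError on empty input arises naturally from max over an empty generator)
--     return max(sum(1 for _ in g) if k else 0
--                for k, g in groupby(arr, key=lambda x: x % 2 == 0))
-- ===== Notes on version B (the rewrite author's own statement) =====
-- stated objective: idiomatic
-- what changed: B replaces A's aliased-list bookkeeping (collecting run lists into result while still mutating them, then a second length-computing pass) with a single itertools.groupby pass over parity that yields each even run's length directly and takes max.
import Mathlib
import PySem

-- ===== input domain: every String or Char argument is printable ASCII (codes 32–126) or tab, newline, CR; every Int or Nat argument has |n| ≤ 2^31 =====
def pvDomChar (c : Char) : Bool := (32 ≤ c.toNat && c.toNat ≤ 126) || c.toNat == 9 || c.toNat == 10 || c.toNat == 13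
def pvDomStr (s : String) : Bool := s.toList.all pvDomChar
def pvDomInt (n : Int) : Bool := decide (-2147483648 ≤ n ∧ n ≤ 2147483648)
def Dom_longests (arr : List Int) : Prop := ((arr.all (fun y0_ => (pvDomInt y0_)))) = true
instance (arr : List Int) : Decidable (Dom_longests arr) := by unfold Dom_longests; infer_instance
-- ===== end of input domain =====

-- B computes the same result with one groupby-style pass over parity instead of A's
-- aliased-list bookkeeping and second length pass; same O(n) cost, objective: idiomatic.

-- ===== PORT A =====
-- A appends the LIVE list `conitnue` into `result` and keeps mutating it; the port models a
-- live reference as `none`, resolved to the run's content when the run is frozen by an odd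
-- element (the `.map` in the odd branch) or to the final `conitnue` after the loop — this is
-- exact w.r.t. Python's aliasing, since all `none` entries always alias the current run.
def longestsStep (arr : List Int) (s : List (Option (List Int)) × List Int) (x : Int) :
    List (Option (List Int)) × List Int :=
  if PySem.Int.mod x 2 == 0 then
    let cur := s.2 ++ [x]
    if some x = PySem.List.pyGet? arr (-1) then (s.1 ++ [none], cur) else (s.1, cur)
  else (s.1.map (fun e => some (e.getD s.2)) ++ [some s.2], [])

def longests (arr : List Int) : Int :=
  let s := arr.foldl (longestsStep arr) ([], [])
  let lens := s.1.map (fun e => ((e.getD s.2).length : Int))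
  (PySem.List.max? lens (fun v => v)).getD 0   -- max([]) raises ValueError: excluded by Pre_

-- ===== PORT B =====
-- itertools.groupby ported as a fold building (key, count) groups, newest group first.
def grpStep (acc : List (Bool × Int)) (x : Int) : List (Bool × Int) :=
  let k := PySem.Int.mod x 2 == 0
  match acc with
  | (k', c) :: rest => if k = k' then (k', c + 1) :: rest else (k, 1) :: (k', c) :: rest
  | [] => [(k, 1)]

def longests_alt (arr : List Int) : Int :=
  let groups := (arr.foldl grpStep []).reverse
  (PySem.List.max? (groups.map fun p => if p.1 then p.2 else (0 : Int)) (fun v => v)).getD 0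

-- ===== PRECONDITION & SPEC =====
-- Pre_ excludes only the empty list, on which Python A raises ValueError (max of an empty
-- list); Python B raises ValueError there too (max of an empty generator).
def Pre_longests (arr : List Int) : Prop := arr ≠ []
instance (arr : List Int) : Decidable (Pre_longests arr) := by unfold Pre_longests; infer_instance
def pvWitness_longests : List Int := [2, 3, 4, 6]

def Spec_longests (arr : List Int) (out : Int) : Prop := out = longests_alt arr
instance (arr : List Int) (out : Int) : Decidable (Spec_longests arr out) := by unfold Spec_longests; infer_instance

-- ===== CLAIM (what is proved, stated in full; the proofs are below) =====
def Claim_equal_longests : Prop := ∀ (arr : List Int), Dom_longests arr → Pre_longests arr → Spec_longests arr (longests arr)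

-- ===== LEMMAS AND PROOFS =====

-- common reference fold: (best even-run length so far, current even-run length)
def sstep (s : Int × Int) (x : Int) : Int × Int :=
  if PySem.Int.mod x 2 == 0 then (max s.1 (s.2 + 1), s.2 + 1) else (s.1, 0)

def bval (q : Bool × Int) : Int := if q.1 then q.2 else 0

-- B-side loop invariant, as a predicate on the state
def PhiB (g : List (Bool × Int)) (b c : Int) : Prop :=
  (∀ q ∈ g, 0 ≤ bval q ∧ bval q ≤ b) ∧
  (g = [] → b = 0 ∧ c = 0) ∧
  (c > 0 → ∃ rest, g = (true, c) :: rest) ∧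
  (c = 0 → g = [] ∨ ∃ m r, g = (false, m) :: r) ∧
  (b > c → ∃ q ∈ g, bval q = b) ∧ 0 ≤ c ∧ c ≤ b

theorem mod2_eq (x : Int) : (PySem.Int.mod x 2 == 0) = decide (2 ∣ x) := by
  have h2 : PySem.Int.mod x 2 = x % 2 := by
    simp [PySem.Int.mod, Int.fmod_eq_emod_of_nonneg]
  by_cases h : (2:Int) ∣ x
  · simp [h, Int.emod_eq_zero_of_dvd h]
  · have hne : x % 2 ≠ 0 := fun hc => h (Int.dvd_of_emod_eq_zero hc)
    simp [h2, h, hne]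

theorem pyGet_neg_one_concat (q : List Int) (x : Int) :
    PySem.List.pyGet? (q ++ [x]) (-1) = some x := by
  simp [PySem.List.pyGet?, PySem.List.pyIdx?]

theorem max?_eq_of_bound_attained (xs : List Int) (b : Int) (hne : xs ≠ [])
    (hub : ∀ v ∈ xs, v ≤ b) (hmem : b ∈ xs) :
    PySem.List.max? xs (fun v => v) = some b := by
  cases h : PySem.List.max? xs (fun v => v) with
  | none => exact absurd ((PySem.List.max?_eq_none_iff xs _).mp h) hne
  | some m =>
    have h1 := PySem.List.max?_isMax h b hmem
    have h2 := hub m (PySem.List.max?_mem h)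
    simp only [] at h1
    rw [le_antisymm h2 h1]

-- A-side loop invariant: the result list is frozen runs followed by k live references to the
-- current run; frozen lengths are bounded by (and, when it exceeds the current run, attained
-- at) the reference fold's best value.
theorem invA (arr p : List Int) :
    ∃ fz k,
      (p.foldl (longestsStep arr) ([], [])).1 = fz.map some ++ List.replicate k none ∧
      ((p.foldl (longestsStep arr) ([], [])).2.length : Int) = (p.foldl sstep (0, 0)).2 ∧
      0 ≤ (p.foldl sstep (0, 0)).2 ∧ (p.foldl sstep (0, 0)).2 ≤ (p.foldl sstep (0, 0)).1 ∧
      (∀ l ∈ fz, (l.length : Int) ≤ (p.foldl sstep (0, 0)).1) ∧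
      ((p.foldl sstep (0, 0)).1 > (p.foldl sstep (0, 0)).2 →
        ∃ l ∈ fz, (l.length : Int) = (p.foldl sstep (0, 0)).1) ∧
      (∀ x, p.getLast? = some x → PySem.Int.mod x 2 == 0 →
        some x = PySem.List.pyGet? arr (-1) → 1 ≤ k) ∧
      (∀ x, p.getLast? = some x → ¬ (PySem.Int.mod x 2 == 0) = true → fz ≠ []) ∧
      (∀ x, p.getLast? = some x → ¬ (PySem.Int.mod x 2 == 0) = true →
        (p.foldl (longestsStep arr) ([], [])).2 = []) := by
  induction p using List.reverseRecOn with
  | nil => exact ⟨[], 0, by simp⟩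
  | append_singleton q x ih =>
    obtain ⟨fz, k, hres, hlen, hc0, hcb, hub, hatt, heven, hodd, hodd2⟩ := ih
    simp only [List.foldl_append, List.foldl_cons, List.foldl_nil] at *
    by_cases hx : 2 ∣ x
    all_goals have hx' := mod2_eq x
    · by_cases hL : some x = PySem.List.pyGet? arr (-1)
      · refine ⟨fz, k + 1, ?_, ?_, ?_, ?_, ?_, ?_, ?_, ?_, ?_⟩
        · simp [longestsStep, hx, hL, hres, List.replicate_succ']
        · simp [longestsStep, hx, hL, sstep]; omega
        · simp [sstep, hx]; try omega
        · simp [sstep, hx]; try omega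
        · intro l hl; simp [sstep, hx]; exact Or.inl (hub l hl)
        · intro hgt; simp [sstep, hx] at hgt ⊢
          obtain ⟨l, hl, he⟩ := hatt (by omega)
          exact ⟨l, hl, by omega⟩
        · intro y _ _ _; omega
        · intro y hy hne; simp at hy; subst hy; rw [hx'] at hne; simp [hx] at hne
        · intro y hy hne; simp at hy; subst hy; rw [hx'] at hne; simp [hx] at hne
      · refine ⟨fz, k, ?_, ?_, ?_, ?_, ?_, ?_, ?_, ?_, ?_⟩
        · simp [longestsStep, hx, hL, hres]
        · simp [longestsStep, hx, hL, sstep]; omega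
        · simp [sstep, hx]; try omega
        · simp [sstep, hx]; try omega
        · intro l hl; simp [sstep, hx]; exact Or.inl (hub l hl)
        · intro hgt; simp [sstep, hx] at hgt ⊢
          obtain ⟨l, hl, he⟩ := hatt (by omega)
          exact ⟨l, hl, by omega⟩
        · intro y hy _ hL'
          simp at hy; subst hy; exact absurd hL' hL
        · intro y hy hne; simp at hy; subst hy; rw [hx'] at hne; simp [hx] at hne
        · intro y hy hne; simp at hy; subst hy; rw [hx'] at hne; simp [hx] at hne
    · refine ⟨fz ++ List.replicate k (q.foldl (longestsStep arr) ([], [])).2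
          ++ [(q.foldl (longestsStep arr) ([], [])).2], 0, ?_, ?_, ?_, ?_, ?_, ?_, ?_, ?_, ?_⟩
      · simp [longestsStep, hx, hres, List.map_replicate]
      · simp [longestsStep, hx, sstep]
      · simp [sstep, hx]
      · simp [sstep, hx]; try omega
      · intro l hl
        simp [sstep, hx]
        simp [List.mem_append, List.mem_replicate] at hl
        rcases hl with hl | ⟨-, hl⟩ | hl
        · exact hub l hl
        · rw [hl]; omega
        · rw [hl]; omega
      · intro hgt; simp [sstep, hx] at hgt ⊢
        rcases lt_or_eq_of_le hcb with h | h
        · obtain ⟨l, hl, he⟩ := hatt h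
          refine ⟨l, ?_, he⟩; simp [hl]
        · refine ⟨(q.foldl (longestsStep arr) ([], [])).2, ?_, by omega⟩; simp
      · intro y hy he _; simp at hy; subst hy; rw [hx'] at he; simp [hx] at he
      · intro y _ _; simp
      · intro y _ _; simp [longestsStep, hx]

theorem PhiB_step (g : List (Bool × Int)) (b c x : Int) (h : PhiB g b c) :
    PhiB (grpStep g x) (sstep (b, c) x).1 (sstep (b, c) x).2 := by
  obtain ⟨hval, hemp, hhead, hhead0, hatt, hc0, hcb⟩ := h
  have hx' := mod2_eq x
  by_cases hx : 2 ∣ x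
  · have hs : sstep (b, c) x = (max b (c + 1), c + 1) := by simp [sstep, hx', hx]
    rw [hs]
    rcases lt_or_eq_of_le hc0 with hcpos | hczero
    · obtain ⟨rest, hgr⟩ := hhead hcpos
      have hgr' : grpStep g x = (true, c + 1) :: rest := by simp [grpStep, hgr, hx', hx]
      rw [hgr']
      refine ⟨?_, by simp, fun _ => ⟨rest, rfl⟩, by intro h; omega, ?_, by omega, by omega⟩
      · intro q' hq'
        rcases List.mem_cons.mp hq' with h | h
        · subst h; simp [bval]; try omega
        · have := hval q' (by rw [hgr]; exact List.mem_cons_of_mem _ h)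
          exact ⟨this.1, le_trans this.2 (le_max_left _ _)⟩
      · intro hgt
        have hb' : b > c + 1 := by rcases max_cases b (c + 1) with ⟨h1, h2⟩ | ⟨h1, h2⟩ <;> omega
        obtain ⟨w, hw, he⟩ := hatt (by omega)
        rw [hgr] at hw
        rcases List.mem_cons.mp hw with h | h
        · subst h; simp [bval] at he; omega
        · exact ⟨w, List.mem_cons_of_mem _ h, by rw [he, max_eq_left (by omega)]⟩
    · have hc' : c = 0 := hczero.symm
      rcases hhead0 hc' with hgr | ⟨m, r, hgr⟩
      · have hgr' : grpStep g x = [(true, 1)] := by simp [grpStep, hgr, hx', hx]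
        rw [hgr', hc']
        refine ⟨?_, by simp, fun _ => ⟨[], rfl⟩, by intro h; omega, ?_, by omega, by omega⟩
        · intro q' hq'; simp at hq'; subst hq'; simp [bval]; try omega
        · intro hgt
          have hb' : b > 1 := by rcases max_cases b (0 + 1 : Int) with ⟨h1, h2⟩ | ⟨h1, h2⟩ <;> omega
          obtain ⟨w, hw, _⟩ := hatt (by omega)
          rw [hgr] at hw; simp at hw
      · have hgr' : grpStep g x = (true, 1) :: (false, m) :: r := by
          simp [grpStep, hgr, hx', hx]
        rw [hgr', hc']
        refine ⟨?_, by simp, fun _ => ⟨(false, m) :: r, rfl⟩, by intro h; omega, ?_, by omega, by omega⟩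
        · intro q' hq'
          rcases List.mem_cons.mp hq' with h | h
          · subst h; simp [bval]; try omega
          · have := hval q' (by rw [hgr]; exact h)
            exact ⟨this.1, le_trans this.2 (le_max_left _ _)⟩
        · intro hgt
          have hb' : b > 1 := by rcases max_cases b (0 + 1 : Int) with ⟨h1, h2⟩ | ⟨h1, h2⟩ <;> omega
          obtain ⟨w, hw, he⟩ := hatt (by omega)
          rw [hgr] at hw
          exact ⟨w, List.mem_cons_of_mem _ hw, by rw [he, max_eq_left (by omega)]⟩
  · have hs : sstep (b, c) x = (b, 0) := by simp [sstep, hx', hx]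
    rw [hs]
    rcases lt_or_eq_of_le hc0 with hcpos | hczero
    · obtain ⟨rest, hgr⟩ := hhead hcpos
      have hgr' : grpStep g x = (false, 1) :: (true, c) :: rest := by
        simp [grpStep, hgr, hx', hx]
      rw [hgr']
      refine ⟨?_, by simp, by intro h; omega, fun _ => Or.inr ⟨1, _, rfl⟩, ?_, by omega, by omega⟩
      · intro q' hq'
        rcases List.mem_cons.mp hq' with h | h
        · subst h; simp [bval]; try omega
        · exact hval q' (by rw [hgr]; exact h)
      · intro hgt
        rcases lt_or_eq_of_le hcb with h | h
        · obtain ⟨w, hw, he⟩ := hatt h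
          rw [hgr] at hw
          exact ⟨w, List.mem_cons_of_mem _ hw, he⟩
        · exact ⟨(true, c), List.mem_cons_of_mem _ (List.mem_cons_self), by simp [bval, h]⟩
    · have hc' : c = 0 := hczero.symm
      rcases hhead0 hc' with hgr | ⟨m, r, hgr⟩
      · have hgr' : grpStep g x = [(false, 1)] := by simp [grpStep, hgr, hx', hx]
        rw [hgr']
        refine ⟨?_, by simp, by intro h; omega, fun _ => Or.inr ⟨1, [], rfl⟩, ?_, by omega, ?_⟩
        · intro q' hq'; simp at hq'; subst hq'; simp [bval]; try omega
        · intro hgt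
          obtain ⟨w, hw, _⟩ := hatt (by omega)
          rw [hgr] at hw; simp at hw
        · have := (hemp hgr).1; omega
      · have hgr' : grpStep g x = (false, m + 1) :: r := by simp [grpStep, hgr, hx', hx]
        rw [hgr']
        refine ⟨?_, by simp, by intro h; omega, fun _ => Or.inr ⟨m + 1, r, rfl⟩, ?_, by omega, by omega⟩
        · intro q' hq'
          rcases List.mem_cons.mp hq' with h | h
          · subst h; simp [bval]
            omega
          · have := hval q' (by rw [hgr]; exact List.mem_cons_of_mem _ h)
            exact this
        · intro hgt
          obtain ⟨w, hw, he⟩ := hatt (by omega)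
          rw [hgr] at hw
          rcases List.mem_cons.mp hw with h | h
          · subst h; simp [bval] at he; omega
          · exact ⟨w, List.mem_cons_of_mem _ h, he⟩

theorem invB (p : List Int) :
    PhiB (p.foldl grpStep []) (p.foldl sstep (0, 0)).1 (p.foldl sstep (0, 0)).2 := by
  induction p using List.reverseRecOn with
  | nil => simp [PhiB, bval]
  | append_singleton q x ih =>
    simp only [List.foldl_append, List.foldl_cons, List.foldl_nil]
    have := PhiB_step _ _ _ x ih
    simpa using this

theorem longests_alt_eq_sfold (arr : List Int) :
    longests_alt arr = (arr.foldl sstep (0, 0)).1 := by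
  obtain ⟨hval, hemp, hhead, hhead0, hatt, hc0, hcb⟩ := invB arr
  set g := arr.foldl grpStep [] with hg
  set b := (arr.foldl sstep (0, 0)).1 with hb
  set c := (arr.foldl sstep (0, 0)).2 with hc
  have hfun : (fun p : Bool × Int => if p.1 then p.2 else (0 : Int)) = bval := rfl
  show (PySem.List.max? (g.reverse.map fun p => if p.1 then p.2 else (0 : Int)) (fun v => v)).getD 0 = b
  rw [hfun]
  have hub : ∀ v ∈ g.reverse.map bval, v ≤ b := by
    intro v hv
    obtain ⟨q', hq', rfl⟩ := List.mem_map.mp hv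
    exact (hval q' (List.mem_reverse.mp hq')).2
  have hmem_of : ∀ w ∈ g, bval w = b → b ∈ g.reverse.map bval := by
    intro w hw he
    exact he ▸ List.mem_map_of_mem (List.mem_reverse.mpr hw)
  rcases lt_or_eq_of_le hcb with hlt | heq
  · obtain ⟨w, hw, he⟩ := hatt hlt
    have mem := hmem_of w hw he
    rw [max?_eq_of_bound_attained _ b (List.ne_nil_of_mem mem) hub mem]; rfl
  · rcases lt_or_eq_of_le hc0 with hcpos | hc0'
    · obtain ⟨rest, hgr⟩ := hhead hcpos
      have mem := hmem_of (true, c) (hgr ▸ List.mem_cons_self) (by simp [bval, heq])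
      rw [max?_eq_of_bound_attained _ b (List.ne_nil_of_mem mem) hub mem]; rfl
    · by_cases hg0 : g = []
      · rw [hg0]
        rw [(PySem.List.max?_eq_none_iff _ _).mpr (by simp)]
        simp; omega
      · obtain ⟨w, hw⟩ := List.exists_mem_of_ne_nil g hg0
        have hv := hval w hw
        have mem := hmem_of w hw (by omega)
        rw [max?_eq_of_bound_attained _ b (List.ne_nil_of_mem mem) hub mem]; rfl

theorem longests_eq_sfold (arr : List Int) (hne : arr ≠ []) :
    longests arr = (arr.foldl sstep (0, 0)).1 := by
  obtain ⟨fz, k, hres, hlen, hc0, hcb, hub, hatt, heven, hodd, hodd2⟩ := invA arr arr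
  set st := arr.foldl (longestsStep arr) ([], []) with hst
  set b := (arr.foldl sstep (0, 0)).1 with hb
  set c := (arr.foldl sstep (0, 0)).2 with hc
  show (PySem.List.max? (st.1.map fun e => ((e.getD st.2).length : Int)) (fun v => v)).getD 0 = b
  set lens := st.1.map fun e => ((e.getD st.2).length : Int) with hlens
  have hlens' : lens = fz.map (fun l => (l.length : Int)) ++ List.replicate k (st.2.length : Int) := by
    rw [hlens, hres]
    simp [List.map_append, List.map_replicate]
  have hub' : ∀ v ∈ lens, v ≤ b := by
    rw [hlens']
    intro v hv
    rcases List.mem_append.mp hv with h | h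
    · obtain ⟨l, hl, rfl⟩ := List.mem_map.mp h
      exact hub l hl
    · rw [(List.eq_of_mem_replicate h)]
      omega
  obtain ⟨q, x, hqx⟩ := List.eq_nil_or_concat' arr |>.resolve_left hne
  have hlast : arr.getLast? = some x := by rw [hqx]; simp
  have hmem : b ∈ lens := by
    rcases lt_or_eq_of_le hcb with hlt | heq
    · obtain ⟨l, hl, he⟩ := hatt hlt
      rw [hlens']
      exact List.mem_append_left _ (he ▸ List.mem_map_of_mem hl)
    · by_cases hx : 2 ∣ x
      · have hk := heven x hlast (by rw [mod2_eq]; simp [hx]) (by rw [hqx]; exact (pyGet_neg_one_concat q x).symm)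
        rw [hlens']
        refine List.mem_append_right _ ?_
        have : (st.2.length : Int) = b := by omega
        rw [this]
        exact List.mem_replicate.mpr ⟨by omega, rfl⟩
      · have hfz := hodd x hlast (by rw [mod2_eq]; simp [hx])
        have hcur := hodd2 x hlast (by rw [mod2_eq]; simp [hx])
        have hcz : c = 0 := by rw [← hlen, hcur]; rfl
        obtain ⟨l, hl⟩ := List.exists_mem_of_ne_nil fz hfz
        have h1 := hub l hl
        rw [hlens']
        refine List.mem_append_left _ ?_
        have : (l.length : Int) = b := by omega
        exact this ▸ List.mem_map_of_mem hl
  rw [max?_eq_of_bound_attained _ b (List.ne_nil_of_mem hmem) hub' hmem]; rfl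

-- ===== VERDICT (by name: the statement is the Claim_ definition above) =====
theorem longests_spec : Claim_equal_longests := by
  intro arr _ hpre
  unfold Spec_longests
  rw [longests_eq_sfold arr hpre, longests_alt_eq_sfold arr]
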